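-- pv_equiv track=rewrite | github.com/ffancer/study_with_codewars | 7 kyu Coding 3min Remove screws I.py | sc
-- ===== SOURCE A (Python) =====
-- def sc(s):
--     i, j = 0, 1
--     time = 1
--
--     while j < len(s):
--         if s[i] != s[j]:
--             time += 5
--         time += 2
--         i += 1
--         j += 1
--
--     return time
-- ===== SOURCE B (Python) =====
-- def sc(s):
--     # Count maximal runs of equal characters by repeatedly stripping the
--     # leading run; mismatching adjacent pairs = runs - 1, pairs = len(s) - 1.
--     runs = 0
--     t = s
--     while t:
--         t = t.lstrip(t[0])
--         runs += 1
--     return 1 + 2 * max(0, len(s) - 1) + 5 * max(0, runs - 1)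
-- ===== Notes on version B (the rewrite author's own statement) =====
-- stated objective: alternative
-- what changed: Replaces the index-based pairwise while loop by run-length counting (repeatedly strip the leading run of equal characters) and the closed form 1 + 2*max(0,len-1) + 5*max(0,runs-1).
import Mathlib
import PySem

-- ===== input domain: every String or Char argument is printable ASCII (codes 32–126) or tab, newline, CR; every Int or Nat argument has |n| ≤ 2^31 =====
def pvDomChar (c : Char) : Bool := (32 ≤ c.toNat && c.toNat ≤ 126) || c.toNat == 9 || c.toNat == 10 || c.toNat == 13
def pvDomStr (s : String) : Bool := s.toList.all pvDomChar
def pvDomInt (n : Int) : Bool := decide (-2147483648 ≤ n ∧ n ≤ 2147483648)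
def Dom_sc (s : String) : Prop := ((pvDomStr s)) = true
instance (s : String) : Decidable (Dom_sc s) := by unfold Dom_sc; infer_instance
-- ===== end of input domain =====

-- B replaces the pairwise index loop by run-length counting (strip the leading run, count runs) plus a closed form (objective: alternative).

-- ===== PORT A =====
-- the Python while loop: indices i, j = i+1 walk the string, time accumulates
def scLoop (cs : List Char) (i j : Nat) (time : Int) : Int :=
  if h : j < cs.length then
    scLoop cs (i + 1) (j + 1)
      ((if cs[i]? ≠ cs[j]? then time + 5 else time) + 2)
  else time
termination_by cs.length - j

def sc (s : String) : Int := scLoop s.toList 0 1 1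

-- ===== PORT B =====
-- the while loop of Source B: strip the leading run (t.lstrip(t[0]) = dropWhile (== t[0])), count runs
def runsLoop (t : List Char) : Nat :=
  match t with
  | [] => 0
  | c :: rest => runsLoop (rest.dropWhile (· == c)) + 1
termination_by t.length
decreasing_by
  have := List.length_dropWhile_le (· == c) rest
  simp; omega

def sc_alt (s : String) : Int :=
  let runs : Int := runsLoop s.toList
  1 + 2 * max 0 ((s.toList.length : Int) - 1) + 5 * max 0 (runs - 1)

-- ===== PRECONDITION & SPEC =====
def Spec_sc (s : String) (out : Int) : Prop := out = sc_alt s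
instance (s : String) (out : Int) : Decidable (Spec_sc s out) := by unfold Spec_sc; infer_instance

-- ===== CLAIM (what is proved, stated in full; the proofs are below) =====
def Claim_equal_sc : Prop := ∀ (s : String), Dom_sc s → Spec_sc s (sc s)

-- ===== LEMMAS AND PROOFS =====

-- the loop's behaviour from state (i, i+1, t), expressed on the suffix cs.drop i
def scPair (l : List Char) (t : Int) : Int :=
  match l with
  | a :: b :: rest => scPair (b :: rest) ((if a ≠ b then t + 5 else t) + 2)
  | _ => t

theorem scLoop_eq_scPair (cs : List Char) :
    ∀ (l : List Char) (i : Nat) (t : Int), cs.drop i = l →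
      scLoop cs i (i + 1) t = scPair l t := by
  intro l
  induction l with
  | nil =>
    intro i t h
    have hlen : cs.length ≤ i := by
      have := congrArg List.length h
      simp [List.length_drop] at this
      omega
    rw [scLoop]
    simp [scPair]
    omega
  | cons a l' ih =>
    intro i t h
    match l', ih with
    | [], _ =>
      have hlen : cs.length = i + 1 := by
        have := congrArg List.length h
        simp [List.length_drop] at this
        omega
      rw [scLoop]
      simp [scPair, hlen]
    | b :: rest, ih =>
      have hlen : i + 1 < cs.length := by
        have := congrArg List.length h
        simp [List.length_drop] at this
        omega
      have hi : cs[i]? = some a := by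
        have : (cs.drop i)[0]? = cs[i]? := by
          rw [List.getElem?_drop, Nat.add_zero]
        rw [← this, h]; rfl
      have hj : cs[i + 1]? = some b := by
        have : (cs.drop i)[1]? = cs[i + 1]? := by
          rw [List.getElem?_drop]
        rw [← this, h]; rfl
      have hdrop : cs.drop (i + 1) = b :: rest := by
        have : cs.drop (i + 1) = (cs.drop i).drop 1 := by
          rw [List.drop_drop]
        rw [this, h]; rfl
      rw [scLoop]
      simp only [hlen, dif_pos, hi, hj]
      have := ih (i + 1) ((if (some a : Option Char) ≠ some b then t + 5 else t) + 2) hdrop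
      rw [this]
      simp [scPair]

-- adjacent-mismatch count, the quantity A's loop accumulates 5s for
def mismCnt : List Char → Int
  | a :: b :: rest => (if a ≠ b then 1 else 0) + mismCnt (b :: rest)
  | _ => 0

theorem scPair_closed : ∀ (rest : List Char) (a : Char) (t : Int),
    scPair (a :: rest) t = t + 2 * (rest.length : Int) + 5 * mismCnt (a :: rest) := by
  intro rest
  induction rest with
  | nil => intro a t; simp [scPair, mismCnt]
  | cons b rs ih =>
    intro a t
    rw [scPair, ih]
    show _ = t + 2 * ((b :: rs).length : Int) + 5 * ((if a ≠ b then 1 else 0) + mismCnt (b :: rs))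
    by_cases h : a = b <;> simp [h] <;> ring

-- one step of run counting against one step of mismatch counting
theorem runsLoop_cons2 (a b : Char) (rs : List Char) :
    runsLoop (a :: b :: rs) = (if a = b then 0 else 1) + runsLoop (b :: rs) := by
  by_cases h : a = b
  · subst h
    rw [runsLoop, runsLoop]
    simp [List.dropWhile]
  · rw [runsLoop]
    have hb : (b == a) = false := by simp [Ne.symm h]
    simp [List.dropWhile, hb, h]
    omega

theorem runs_eq_mism : ∀ (rest : List Char) (a : Char),
    (runsLoop (a :: rest) : Int) = mismCnt (a :: rest) + 1 := by
  intro rest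
  induction rest with
  | nil => intro a; simp [runsLoop, mismCnt]
  | cons b rs ih =>
    intro a
    rw [runsLoop_cons2]
    show ((((if a = b then 0 else 1) + runsLoop (b :: rs) : Nat)) : Int)
        = (if a ≠ b then 1 else 0) + mismCnt (b :: rs) + 1
    push_cast
    rw [ih]
    by_cases h : a = b <;> simp [h] <;> ring

theorem sc_eq (s : String) : sc s = sc_alt s := by
  unfold sc sc_alt
  have h := scLoop_eq_scPair s.toList s.toList 0 1 rfl
  rw [h]
  match s.toList with
  | [] => simp [scPair, runsLoop]
  | a :: rest =>
    rw [scPair_closed]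
    have hr := runs_eq_mism rest a
    have hm : (0 : Int) ≤ mismCnt (a :: rest) := by
      clear hr
      induction rest generalizing a with
      | nil => simp [mismCnt]
      | cons b rs ih =>
        have := ih b
        show (0 : Int) ≤ (if a ≠ b then 1 else 0) + mismCnt (b :: rs)
        by_cases h : a = b <;> simp [h] <;> omega
    simp only [hr]
    simp [List.length_cons]
    omega

-- ===== VERDICT (by name: the statement is the Claim_ definition above) =====
theorem sc_spec : Claim_equal_sc := by
  intro s _; exact sc_eq s
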